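-- pv_equiv track=rewrite | github.com/Smile-SA/hots | hots/plugins/problem/placement.py | _find_cluster_anchors
-- ===== SOURCE A (Python) =====
-- from typing import Any, Dict, Iterable, List, Optional, Sequence, Tuple
--
-- def _find_cluster_anchors(
--     host_members: Dict[Any, List[Any]], cl_of: Dict[Any, int], target_set: set
-- ) -> Dict[int, Any]:
--     """Find anchor host for each target cluster (host with most members)."""
--     anchors: Dict[int, Any] = {}
--     for c in target_set:
--         best_h, best_cnt = None, -1
--         for h, members in host_members.items():
--             cnt = sum(1 for cid in members if cl_of.get(cid, -1) == c)
--             if cnt > best_cnt: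
--                 best_cnt, best_h = cnt, h
--         if best_h is not None:
--             anchors[c] = best_h
--     return anchors
-- ===== SOURCE B (Python) =====
-- def _find_cluster_anchors(host_members, cl_of, target_set):
--     """Find anchor host for each target cluster (host with most members)."""
--     items = list(host_members.items())
--     if not items:
--         return {}
--
--     def cluster_counts(members):
--         cnt = {}
--         for cid in members:
--             c = cl_of.get(cid, -1)
--             cnt[c] = cnt.get(c, 0) + 1
--         return cnt
--
--     h0, m0 = items[0]
--     first = cluster_counts(m0)
--     best = {c: (first.get(c, 0), h0) for c in target_set}
--     for h, m in items[1:]: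
--         cnt = cluster_counts(m)
--         for c in target_set:
--             n = cnt.get(c, 0)
--             if n > best[c][0]:
--                 best[c] = (n, h)
--     return {c: best[c][1] for c in target_set}
-- ===== Notes on version B (the rewrite author's own statement) =====
-- stated objective: faster
-- what changed: A rescans every host's member list once per target cluster (nested loops cluster x host x members); B makes one pass over host_members, builds a per-host cluster-count dict in one sweep of its members, seeds best[c]=(count,host) from the first host and then updates it per cluster by a strict-improvement rule, so each member list is traversed exactly once.
import Mathlib
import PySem

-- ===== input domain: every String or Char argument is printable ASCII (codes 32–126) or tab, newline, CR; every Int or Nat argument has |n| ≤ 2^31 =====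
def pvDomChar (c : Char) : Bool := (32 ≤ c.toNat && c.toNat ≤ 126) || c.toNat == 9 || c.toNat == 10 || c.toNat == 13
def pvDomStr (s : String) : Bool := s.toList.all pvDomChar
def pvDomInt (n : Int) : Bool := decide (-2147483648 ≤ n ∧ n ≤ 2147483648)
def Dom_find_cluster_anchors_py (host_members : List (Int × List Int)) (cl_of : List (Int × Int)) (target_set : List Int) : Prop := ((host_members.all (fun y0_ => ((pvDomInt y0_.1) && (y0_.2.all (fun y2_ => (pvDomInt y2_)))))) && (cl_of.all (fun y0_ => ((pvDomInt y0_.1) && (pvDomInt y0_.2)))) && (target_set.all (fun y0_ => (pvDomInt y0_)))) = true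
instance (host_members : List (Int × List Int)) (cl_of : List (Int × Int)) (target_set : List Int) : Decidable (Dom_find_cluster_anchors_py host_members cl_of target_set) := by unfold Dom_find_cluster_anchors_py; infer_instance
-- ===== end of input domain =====

-- B replaces A's per-cluster rescan of every member list by a single pass over hosts with a
-- per-host cluster-count dict and a running best[(count, host)] per target cluster (objective: faster).

-- ===== PORT A =====
def find_cluster_anchors_py (host_members : List (Int × List Int)) (cl_of : List (Int × Int)) (target_set : List Int) : List (Int × Int) :=
  (target_set.foldl
    (fun (anchors : PySem.Dict Int Int) c =>
      let best := host_members.foldl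
        (fun (st : Option Int × Int) p =>
          let cnt : Int := ((p.2.filter (fun cid => (PySem.Dict.mk cl_of).getD cid (-1) == c)).length : Int)
          if cnt > st.2 then (some p.1, cnt) else st)
        (none, -1)
      match best.1 with
      | some h => anchors.insert c h
      | none => anchors)
    PySem.Dict.empty).items

-- ===== PORT B =====
-- cluster_counts(members) of Source B: one sweep over the member list
def pvClusterCounts (cl_of : List (Int × Int)) (members : List Int) : PySem.Dict Int Int :=
  members.foldl
    (fun cnt cid =>
      let c := (PySem.Dict.mk cl_of).getD cid (-1)
      cnt.insert c (cnt.getD c 0 + 1))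
    PySem.Dict.empty

def find_cluster_anchors_py_alt (host_members : List (Int × List Int)) (cl_of : List (Int × Int)) (target_set : List Int) : List (Int × Int) :=
  match host_members with
  | [] => []
  | (h0, m0) :: rest =>
    let first := pvClusterCounts cl_of m0
    let best0 : PySem.Dict Int (Int × Int) :=
      target_set.foldl (fun d c => d.insert c (first.getD c 0, h0)) PySem.Dict.empty
    let best := rest.foldl
      (fun best p =>
        let cnt := pvClusterCounts cl_of p.2
        target_set.foldl
          (fun b c =>
            if cnt.getD c 0 > (b.getD c (0, 0)).1 then b.insert c (cnt.getD c 0, p.1) else b)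
          best)
      best0
    (target_set.foldl (fun (acc : PySem.Dict Int Int) c => acc.insert c (best.getD c (0, 0)).2)
      PySem.Dict.empty).items

-- ===== PRECONDITION & SPEC =====
def Spec_find_cluster_anchors_py (host_members : List (Int × List Int)) (cl_of : List (Int × Int)) (target_set : List Int) (out : List (Int × Int)) : Prop := out = find_cluster_anchors_py_alt host_members cl_of target_set
instance (host_members : List (Int × List Int)) (cl_of : List (Int × Int)) (target_set : List Int) (out : List (Int × Int)) : Decidable (Spec_find_cluster_anchors_py host_members cl_of target_set out) := by unfold Spec_find_cluster_anchors_py; infer_instance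

-- ===== CLAIM (what is proved, stated in full; the proofs are below) =====
def Claim_equal_find_cluster_anchors_py : Prop := ∀ (host_members : List (Int × List Int)) (cl_of : List (Int × Int)) (target_set : List Int), Dom_find_cluster_anchors_py host_members cl_of target_set → Spec_find_cluster_anchors_py host_members cl_of target_set (find_cluster_anchors_py host_members cl_of target_set)

-- ===== LEMMAS AND PROOFS =====

-- A's inner-loop step, named for the proofs (definitionally the lambda in port A)
def pvAstep (cl_of : List (Int × Int)) (c : Int) (st : Option Int × Int) (p : Int × List Int) : Option Int × Int :=
  let cnt : Int := ((p.2.filter (fun cid => (PySem.Dict.mk cl_of).getD cid (-1) == c)).length : Int)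
  if cnt > st.2 then (some p.1, cnt) else st

-- A's per-cluster member count
def pvCnt (cl_of : List (Int × Int)) (m : List Int) (c : Int) : Int :=
  ((m.filter (fun cid => (PySem.Dict.mk cl_of).getD cid (-1) == c)).length : Int)

-- B's per-host step, named for the proofs (definitionally the lambda in port B)
def pvBstep (cl_of : List (Int × Int)) (ts : List Int) (best : PySem.Dict Int (Int × Int)) (p : Int × List Int) : PySem.Dict Int (Int × Int) :=
  let cnt := pvClusterCounts cl_of p.2
  ts.foldl
    (fun b c =>
      if cnt.getD c 0 > (b.getD c (0, 0)).1 then b.insert c (cnt.getD c 0, p.1) else b)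
    best

lemma pvCounts_getD (cl_of : List (Int × Int)) (m : List Int) (c : Int) :
    (pvClusterCounts cl_of m).getD c 0 = pvCnt cl_of m c := by
  have key : ∀ (f : Int → Int) (m : List Int) (d : PySem.Dict Int Int) (c : Int),
      (m.foldl (fun cnt cid => let k := f cid; cnt.insert k (cnt.getD k 0 + 1)) d).getD c 0
        = d.getD c 0 + ((m.filter (fun cid => f cid == c)).length : Int) := by
    intro f m
    induction m with
    | nil => intro d c; simp
    | cons x m ih =>
      intro d c
      simp only [List.foldl_cons, List.filter_cons, ih]
      by_cases hx : f x = c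
      · simp [hx]
        ring
      · have hb : (f x == c) = false := by simp [hx]
        rw [PySem.Dict.getD_insert, if_neg (fun h => hx h.symm)]
        simp [hb]
  unfold pvClusterCounts pvCnt
  rw [key (fun cid => (PySem.Dict.mk cl_of).getD cid (-1)) m PySem.Dict.empty c]
  simp

lemma pvSeed_getD {ν : Type} (v : Int → ν) (ts : List Int) (d0 : PySem.Dict Int ν) (c : Int) (dd : ν) :
    (ts.foldl (fun d x => d.insert x (v x)) d0).getD c dd
      = if c ∈ ts then v c else d0.getD c dd := by
  induction ts generalizing d0 with
  | nil => simp
  | cons a ts ih =>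
    simp only [List.foldl_cons, ih, PySem.Dict.getD_insert, List.mem_cons]
    by_cases hc : c ∈ ts <;> by_cases hca : c = a <;> simp [hc, hca]

lemma pvHostfold_getD (n : Int → Int) (h : Int) (ts : List Int)
    (b : PySem.Dict Int (Int × Int)) (c : Int) :
    (ts.foldl (fun b x => if n x > (b.getD x (0,0)).1 then b.insert x (n x, h) else b) b).getD c (0,0)
      = if c ∈ ts then (if n c > (b.getD c (0,0)).1 then (n c, h) else b.getD c (0,0))
        else b.getD c (0,0) := by
  induction ts generalizing b with
  | nil => simp
  | cons a ts ih =>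
    simp only [List.foldl_cons, ih, List.mem_cons]
    by_cases hca : c = a
    · subst hca
      by_cases h1 : n c > (b.getD c (0,0)).1
      · simp only [if_pos h1, PySem.Dict.getD_insert]
        by_cases hc : c ∈ ts <;> simp [hc]
      · simp only [if_neg h1]
        by_cases hc : c ∈ ts <;> simp [hc]
    · have : (if n a > (b.getD a (0,0)).1 then b.insert a (n a, h) else b).getD c (0,0)
          = b.getD c (0,0) := by
        split
        · rw [PySem.Dict.getD_insert, if_neg hca]
        · rfl
      rw [this]
      by_cases hc : c ∈ ts <;> simp [hc, hca]

lemma pvInv (cl_of : List (Int × Int)) (ts : List Int) (rest : List (Int × List Int)) :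
    ∀ (best : PySem.Dict Int (Int × Int)) (stf : Int → Option Int × Int),
      (∀ c ∈ ts, best.getD c (0,0) = ((stf c).2, (stf c).1.getD 0)) →
      ∀ c ∈ ts, (rest.foldl (pvBstep cl_of ts) best).getD c (0,0)
        = ((rest.foldl (pvAstep cl_of c) (stf c)).2,
           (rest.foldl (pvAstep cl_of c) (stf c)).1.getD 0) := by
  induction rest with
  | nil => intro best stf h c hc; simpa using h c hc
  | cons p rest ih =>
    intro best stf h c hc
    simp only [List.foldl_cons]
    refine ih (pvBstep cl_of ts best p) (fun c => pvAstep cl_of c (stf c) p) ?_ c hc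
    intro c hc
    show (pvBstep cl_of ts best p).getD c (0,0) = _
    unfold pvBstep
    rw [pvHostfold_getD (fun x => (pvClusterCounts cl_of p.2).getD x 0) p.1 ts best c]
    rw [if_pos hc, pvCounts_getD, h c hc]
    have hA : pvAstep cl_of c (stf c) p
        = if pvCnt cl_of p.2 c > (stf c).2 then (some p.1, pvCnt cl_of p.2 c) else stf c := rfl
    beta_reduce
    rw [hA]
    by_cases hgt : pvCnt cl_of p.2 c > (stf c).2 <;> simp [hgt]

lemma pvFold_isSome (cl_of : List (Int × Int)) (c : Int) (l : List (Int × List Int))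
    (st : Option Int × Int) (h : st.1.isSome) :
    ((l.foldl (pvAstep cl_of c) st).1).isSome := by
  induction l generalizing st with
  | nil => exact h
  | cons p l ih =>
    simp only [List.foldl_cons]
    apply ih
    have hA : pvAstep cl_of c st p
        = if pvCnt cl_of p.2 c > st.2 then (some p.1, pvCnt cl_of p.2 c) else st := rfl
    rw [hA]
    split
    · simp
    · exact h

lemma pvFoldl_congr_fun {α β : Type} (l : List β) (f g : α → β → α) (a : α)
    (h : ∀ x ∈ l, ∀ acc, f acc x = g acc x) : l.foldl f a = l.foldl g a := by
  induction l generalizing a with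
  | nil => rfl
  | cons x l ih =>
    simp only [List.foldl_cons]
    rw [h x (by simp)]
    exact ih _ (fun y hy acc => h y (by simp [hy]) acc)

theorem pv_main (host_members : List (Int × List Int)) (cl_of : List (Int × Int)) (target_set : List Int) :
    find_cluster_anchors_py host_members cl_of target_set
      = find_cluster_anchors_py_alt host_members cl_of target_set := by
  cases host_members with
  | nil =>
    have hA : find_cluster_anchors_py [] cl_of target_set
        = (target_set.foldl (fun (anchors : PySem.Dict Int Int) _ => anchors) PySem.Dict.empty).items := rfl
    have hid : ∀ (l : List Int) (d : PySem.Dict Int Int), l.foldl (fun a _ => a) d = d := by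
      intro l
      induction l with
      | nil => intro d; rfl
      | cons x l ih => intro d; exact ih d
    rw [hA, hid]
    rfl
  | cons hd rest =>
    obtain ⟨h0, m0⟩ := hd
    have hA : find_cluster_anchors_py ((h0, m0) :: rest) cl_of target_set
        = (target_set.foldl (fun (anchors : PySem.Dict Int Int) c =>
            match (((h0, m0) :: rest).foldl (pvAstep cl_of c) (none, -1)).1 with
            | some h => anchors.insert c h
            | none => anchors) PySem.Dict.empty).items := rfl
    have hB : find_cluster_anchors_py_alt ((h0, m0) :: rest) cl_of target_set
        = (target_set.foldl (fun (acc : PySem.Dict Int Int) c =>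
            acc.insert c ((rest.foldl (pvBstep cl_of target_set)
              (target_set.foldl
                (fun d c => d.insert c ((pvClusterCounts cl_of m0).getD c 0, h0))
                PySem.Dict.empty)).getD c (0, 0)).2)
            PySem.Dict.empty).items := rfl
    set best0 : PySem.Dict Int (Int × Int) :=
      target_set.foldl (fun d c => d.insert c ((pvClusterCounts cl_of m0).getD c 0, h0))
        PySem.Dict.empty with hbest0
    set stf : Int → Option Int × Int := fun c => (some h0, pvCnt cl_of m0 c) with hstf
    have hstart : ∀ c : Int, pvAstep cl_of c (none, -1) (h0, m0) = (some h0, pvCnt cl_of m0 c) := by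
      intro c
      have he : pvAstep cl_of c (none, -1) (h0, m0)
          = if pvCnt cl_of m0 c > (-1 : Int) then (some h0, pvCnt cl_of m0 c) else (none, -1) := rfl
      have hnn : (0 : Int) ≤ pvCnt cl_of m0 c := by unfold pvCnt; exact Int.natCast_nonneg _
      rw [he, if_pos (by omega)]
    have hseed : ∀ c ∈ target_set, best0.getD c (0, 0) = ((stf c).2, (stf c).1.getD 0) := by
      intro c hc
      rw [hbest0, pvSeed_getD (fun c => ((pvClusterCounts cl_of m0).getD c 0, h0))
            target_set PySem.Dict.empty c (0, 0), if_pos hc, pvCounts_getD]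
      simp [hstf]
    have hWA : ∀ c ∈ target_set,
        (rest.foldl (pvAstep cl_of c) (pvAstep cl_of c (none, -1) (h0, m0))).1.getD 0
          = ((rest.foldl (pvBstep cl_of target_set) best0).getD c (0, 0)).2 := by
      intro c hc
      rw [hstart c, pvInv cl_of target_set rest best0 stf hseed c hc]
    have hS : ∀ c : Int,
        (rest.foldl (pvAstep cl_of c) (pvAstep cl_of c (none, -1) (h0, m0))).1.isSome := by
      intro c
      rw [hstart c]
      exact pvFold_isSome cl_of c rest _ (by simp)
    rw [hA, hB]
    congr 1
    apply pvFoldl_congr_fun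
    intro c hc acc
    rcases hopt : (rest.foldl (pvAstep cl_of c) (pvAstep cl_of c (none, -1) (h0, m0))).1 with _ | h
    · have := hS c
      rw [hopt] at this
      exact absurd this (by simp)
    · rw [← hWA c hc, List.foldl_cons, hopt]
      rfl

-- ===== VERDICT (by name: the statement is the Claim_ definition above) =====
theorem find_cluster_anchors_py_spec : Claim_equal_find_cluster_anchors_py := by
  intro hm cl ts _
  exact pv_main hm cl ts
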